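-- pv_equiv track=rewrite | github.com/ming-taro/baekjoon-online-judge | 프로그래머스/lv2/42586. 기능개발/기능개발.py | solution
-- ===== SOURCE A (Python) =====
-- def solution(progresses, speeds):
--     answer = []
--     days = []
--     size = len(progresses)
--
--     for index in range(size):
--         remain = 100 - progresses[index]
--         days.append(remain//speeds[index])
--
--         if remain % speeds[index] > 0:
--             days[index] += 1
--
--     index = 0
--
--     while index < size:
--         today = days[index]
--         task = 0
--
--         while index < size and days[index] <= today:
--             task += 1
--             index += 1
--
--         answer.append(task)
--
--     return answer
-- ===== SOURCE B (Python) =====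
-- def solution(progresses, speeds):
--     days = [(100 - progresses[i]) // speeds[i]
--             + (1 if (100 - progresses[i]) % speeds[i] > 0 else 0)
--             for i in range(len(progresses))]
--     starts = [i for i in range(len(days))
--               if all(days[k] < days[i] for k in range(i))]
--     return [b - a for a, b in zip(starts, starts[1:] + [len(days)])]
-- ===== Notes on version B (the rewrite author's own statement) =====
-- stated objective: alternative
-- what changed: B recasts A's sequential run-walking as record-high detection: it builds the days list by comprehension, collects the boundary indices whose day count exceeds every earlier one, and returns the consecutive differences of those boundaries (with len(days) as sentinel), instead of A's nested while loops that walk each group element by element.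
import Mathlib
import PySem

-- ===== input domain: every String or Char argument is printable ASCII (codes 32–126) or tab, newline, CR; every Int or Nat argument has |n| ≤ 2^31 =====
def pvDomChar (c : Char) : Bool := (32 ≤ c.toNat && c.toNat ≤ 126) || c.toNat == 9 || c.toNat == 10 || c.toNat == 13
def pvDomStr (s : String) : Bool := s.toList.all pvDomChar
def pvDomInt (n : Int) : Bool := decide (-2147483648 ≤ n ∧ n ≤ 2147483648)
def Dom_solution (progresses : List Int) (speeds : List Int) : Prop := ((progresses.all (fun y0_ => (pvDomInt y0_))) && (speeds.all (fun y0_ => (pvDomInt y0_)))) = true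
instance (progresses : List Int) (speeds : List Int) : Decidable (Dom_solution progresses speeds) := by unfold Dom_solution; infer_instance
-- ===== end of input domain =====

-- B replaces A's nested while-loop group walk by record-high boundary detection:
-- collect the indices whose day count exceeds every earlier one and return their
-- consecutive differences; objective: alternative (not faster).

-- ===== PORT A =====
-- first for-loop of A: build the days list
def solDays (progresses : List Int) (speeds : List Int) : List Int :=
  (PySem.List.pyRange 0 progresses.length 1).foldl
    (fun days index =>
      let remain := 100 - PySem.List.pyGetD progresses index 0
      let days := days ++ [PySem.Int.floordiv remain (PySem.List.pyGetD speeds index 0)]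
      if PySem.Int.mod remain (PySem.List.pyGetD speeds index 0) > 0 then
        PySem.List.pySetD days index (PySem.List.pyGetD days index 0 + 1)
      else days)
    []

-- inner while loop of A (fuel-based structural recursion; fuel ≥ size - index suffices,
-- the caller supplies it, so this computes exactly A's loop)
def solInner (fuel : Nat) (days : List Int) (size : Int) (today : Int) (index : Int) (task : Int) : Int × Int :=
  match fuel with
  | 0 => (index, task)
  | Nat.succ f =>
    if index < size ∧ PySem.List.pyGetD days index 0 ≤ today then
      solInner f days size today (index + 1) (task + 1)
    else (index, task)

-- outer while loop of A (fuel-based; the index strictly increases each iteration)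
def solOuter (fuel : Nat) (days : List Int) (size : Int) (index : Int) (answer : List Int) : List Int :=
  match fuel with
  | 0 => answer
  | Nat.succ f =>
    if index < size then
      let today := PySem.List.pyGetD days index 0
      let p := solInner (Nat.succ f) days size today index 0
      solOuter f days size p.1 (answer ++ [p.2])
    else answer

def solution (progresses : List Int) (speeds : List Int) : List Int :=
  let size : Int := progresses.length
  let days := solDays progresses speeds
  solOuter progresses.length days size 0 []

-- ===== PORT B =====
-- B: days by comprehension, then the record-high boundary indices, then their differences
def solution_alt (progresses : List Int) (speeds : List Int) : List Int :=
  let days := (PySem.List.pyRange 0 progresses.length 1).map (fun i =>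
    PySem.Int.floordiv (100 - PySem.List.pyGetD progresses i 0) (PySem.List.pyGetD speeds i 0)
    + (if PySem.Int.mod (100 - PySem.List.pyGetD progresses i 0) (PySem.List.pyGetD speeds i 0) > 0 then 1 else 0))
  let starts := (PySem.List.pyRange 0 days.length 1).filter (fun i =>
    (PySem.List.pyRange 0 i 1).all (fun k => decide (PySem.List.pyGetD days k 0 < PySem.List.pyGetD days i 0)))
  (starts.zip (starts.drop 1 ++ [(days.length : Int)])).map (fun p => p.2 - p.1)

-- ===== PRECONDITION & SPEC =====
-- Pre_ excludes exactly the inputs on which Python A raises: an IndexError when speeds is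
-- shorter than progresses, or a ZeroDivisionError when a used speed is 0 (B raises there too).
def Pre_solution (progresses : List Int) (speeds : List Int) : Prop :=
  progresses.length ≤ speeds.length ∧ ∀ s ∈ speeds.take progresses.length, s ≠ 0
instance (progresses : List Int) (speeds : List Int) : Decidable (Pre_solution progresses speeds) := by
  unfold Pre_solution; infer_instance
def pvWitness_solution : List Int × List Int := ([93, 30, 55], [1, 30, 5])

def Spec_solution (progresses : List Int) (speeds : List Int) (out : List Int) : Prop := out = solution_alt progresses speeds
instance (progresses : List Int) (speeds : List Int) (out : List Int) : Decidable (Spec_solution progresses speeds out) := by unfold Spec_solution; infer_instance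

-- ===== CLAIM (what is proved, stated in full; the proofs are below) =====
def Claim_equal_solution : Prop := ∀ (progresses : List Int) (speeds : List Int), Dom_solution progresses speeds → Pre_solution progresses speeds → Spec_solution progresses speeds (solution progresses speeds)

-- ===== LEMMAS AND PROOFS =====

-- the per-feature number of days, shared characterisation of both ports
def dayAt (progresses : List Int) (speeds : List Int) (i : Int) : Int :=
  let remain := 100 - PySem.List.pyGetD progresses i 0
  let s := PySem.List.pyGetD speeds i 0
  if PySem.Int.mod remain s > 0 then PySem.Int.floordiv remain s + 1
  else PySem.Int.floordiv remain s

def dayList (progresses : List Int) (speeds : List Int) (n : Nat) : List Int :=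
  (List.range n).map (fun k : Nat => dayAt progresses speeds ((k : Nat) : Int))

-- reference grouping of a days list
def group (days : List Int) : List Int :=
  match days with
  | [] => []
  | x :: xs =>
      (1 + ((xs.takeWhile (fun y => decide (y ≤ x))).length : Int))
        :: group (xs.dropWhile (fun y => decide (y ≤ x)))
termination_by days.length
decreasing_by
  simp only [List.length_cons]
  exact Nat.lt_succ_of_le (List.dropWhile_suffix _).length_le

theorem solDays_eq (progresses speeds : List Int) :
    solDays progresses speeds = dayList progresses speeds progresses.length := by
  unfold solDays
  suffices h : ∀ n : Nat,
      (PySem.List.pyRange 0 n 1).foldl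
        (fun days index =>
          let remain := 100 - PySem.List.pyGetD progresses index 0
          let days := days ++ [PySem.Int.floordiv remain (PySem.List.pyGetD speeds index 0)]
          if PySem.Int.mod remain (PySem.List.pyGetD speeds index 0) > 0 then
            PySem.List.pySetD days index (PySem.List.pyGetD days index 0 + 1)
          else days)
        [] = dayList progresses speeds n from h progresses.length
  intro n
  rw [PySem.List.pyRange_zero_nat, List.foldl_map]
  induction n with
  | zero => simp [dayList]
  | succ n ih =>
    rw [List.range_succ, List.foldl_append, ih]
    have hlen : (dayList progresses speeds n).length = n := by
      simp [dayList]
    simp only [List.foldl_cons, List.foldl_nil]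
    have hget : PySem.List.pyGetD
        (dayList progresses speeds n ++ [PySem.Int.floordiv (100 - PySem.List.pyGetD progresses (n : Int) 0) (PySem.List.pyGetD speeds (n : Int) 0)])
        (n : Int) 0
        = PySem.Int.floordiv (100 - PySem.List.pyGetD progresses (n : Int) 0) (PySem.List.pyGetD speeds (n : Int) 0) := by
      rw [PySem.List.pyGetD_natCast]
      rw [List.getD_eq_getElem?_getD]
      rw [List.getElem?_append_right (by omega)]
      simp [hlen]
    have hset : ∀ v w : Int, PySem.List.pySetD (dayList progresses speeds n ++ [v]) (n : Int) w
        = dayList progresses speeds n ++ [w] := by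
      intro v w
      rw [PySem.List.pySetD_natCast]
      apply List.ext_getElem
      · simp
      · intro k h1 h2
        simp only [List.length_set, List.length_append, hlen] at h1
        by_cases hk : k = n
        · subst hk
          rw [List.getElem_set_self (by simp [hlen])]
          rw [List.getElem_append_right (by omega)]
          simp [hlen]
        · rw [List.getElem_set_ne (by omega)]
          have hkn : k < n := by simp at h1; omega
          rw [List.getElem_append_left (by omega), List.getElem_append_left (by omega)]
    have hday : dayList progresses speeds (n + 1)
        = dayList progresses speeds n ++ [dayAt progresses speeds (n : Int)] := by
      simp [dayList, List.range_succ]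
    rw [hday]
    split
    next hm =>
      rw [hget, hset]
      simp only [dayAt]
      rw [if_pos hm]
    next hm =>
      simp only [dayAt]
      rw [if_neg hm]

-- inner while loop ≡ takeWhile on the remaining suffix
theorem solInner_eq (days : List Int) (today : Int) :
    ∀ (fuel : Nat) (index task : Int), 0 ≤ index →
      ((days.length : Int) - index).toNat ≤ fuel →
      solInner fuel days (days.length : Int) today index task
        = (index + (((days.drop index.toNat).takeWhile (fun y => decide (y ≤ today))).length : Int),
           task + (((days.drop index.toNat).takeWhile (fun y => decide (y ≤ today))).length : Int)) := by
  intro fuel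
  induction fuel with
  | zero =>
    intro index task h0 hf
    have : days.drop index.toNat = [] := List.drop_eq_nil_of_le (by omega)
    simp [solInner, this]
  | succ f ih =>
    intro index task h0 hf
    rw [solInner]
    by_cases hlt : index < (days.length : Int)
    · have hix : index.toNat < days.length := by omega
      have hdrop : days.drop index.toNat = days[index.toNat] :: days.drop (index.toNat + 1) :=
        List.drop_eq_getElem_cons hix
      have hget : PySem.List.pyGetD days index 0 = days[index.toNat] :=
        PySem.List.pyGetD_eq_getElem days 0 h0 hlt
      by_cases hle : days[index.toNat] ≤ today
      · rw [if_pos ⟨hlt, by rw [hget]; exact hle⟩]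
        rw [ih (index + 1) (task + 1) (by omega) (by omega)]
        have ht : (index + 1).toNat = index.toNat + 1 := by omega
        have hTW : ((days.drop index.toNat).takeWhile (fun y => decide (y ≤ today))).length
            = ((days.drop (index.toNat + 1)).takeWhile (fun y => decide (y ≤ today))).length + 1 := by
          rw [hdrop, List.takeWhile_cons]
          simp [hle]
        rw [ht]
        simp only [Prod.mk.injEq, hTW]
        push_cast
        omega
      · rw [if_neg (by rw [hget]; tauto)]
        have hTW : ((days.drop index.toNat).takeWhile (fun y => decide (y ≤ today))).length = 0 := by
          rw [hdrop, List.takeWhile_cons]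
          simp [hle]
        simp [hTW]
    · rw [if_neg (by tauto)]
      have : days.drop index.toNat = [] := List.drop_eq_nil_of_le (by omega)
      simp [this]

-- outer while loop ≡ group of the remaining suffix
theorem solOuter_eq (days : List Int) :
    ∀ (fuel : Nat) (index : Int), 0 ≤ index →
      ((days.length : Int) - index).toNat ≤ fuel →
      ∀ answer, solOuter fuel days (days.length : Int) index answer
        = answer ++ group (days.drop index.toNat) := by
  intro fuel
  induction fuel with
  | zero =>
    intro index h0 hf answer
    have : days.drop index.toNat = [] := List.drop_eq_nil_of_le (by omega)
    simp [solOuter, this, group]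
  | succ f ih =>
    intro index h0 hf answer
    rw [solOuter]
    by_cases hlt : index < (days.length : Int)
    · rw [if_pos hlt]
      have hix : index.toNat < days.length := by omega
      have hdrop : days.drop index.toNat = days[index.toNat] :: days.drop (index.toNat + 1) :=
        List.drop_eq_getElem_cons hix
      have hget : PySem.List.pyGetD days index 0 = days[index.toNat] :=
        PySem.List.pyGetD_eq_getElem days 0 h0 hlt
      set x := days[index.toNat] with hx
      set rest := days.drop (index.toNat + 1) with hrest
      set k : Nat := (rest.takeWhile (fun y => decide (y ≤ x))).length with hk
      have hkle : k ≤ rest.length :=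
        List.IsPrefix.length_le (List.takeWhile_prefix _)
      have hrestlen : rest.length = days.length - (index.toNat + 1) := by
        simp [hrest]
      have hTW : ((days.drop index.toNat).takeWhile (fun y => decide (y ≤ x))).length = k + 1 := by
        rw [hdrop, List.takeWhile_cons]
        simp [← hk]
      have hinner : solInner (Nat.succ f) days (days.length : Int) (PySem.List.pyGetD days index 0) index 0
          = (index + ((k : Int) + 1), 0 + ((k : Int) + 1)) := by
        rw [hget, solInner_eq days x (Nat.succ f) index 0 h0 (by omega), hTW]
        push_cast
        rfl
      simp only [hinner]
      rw [ih (index + ((k : Int) + 1)) (by omega) (by omega) (answer ++ [0 + ((k : Int) + 1)])]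
      have hdropk : days.drop (index + ((k : Int) + 1)).toNat
          = rest.dropWhile (fun y => decide (y ≤ x)) := by
        have h1 : (index + ((k : Int) + 1)).toNat = (index.toNat + 1) + k := by omega
        rw [h1, ← List.drop_drop, ← hrest]
        conv_lhs => rw [← List.takeWhile_append_dropWhile (p := fun y => decide (y ≤ x)) (l := rest)]
        exact List.drop_left' hk.symm
      rw [hdropk]
      conv_rhs => rw [hdrop, group]
      simp
      rw [← hk]
      ring_nf
    · rw [if_neg hlt]
      have : days.drop index.toNat = [] := List.drop_eq_nil_of_le (by omega)
      simp [this, group]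

theorem solution_eq_group (progresses speeds : List Int) :
    solution progresses speeds = group (dayList progresses speeds progresses.length) := by
  unfold solution
  rw [solDays_eq]
  have hlen : (dayList progresses speeds progresses.length).length = progresses.length := by
    simp [dayList]
  have h := solOuter_eq (dayList progresses speeds progresses.length) progresses.length 0
    (by omega) (by omega) []
  rw [hlen] at h
  simpa [hlen] using h

-- ===== B-side abstraction: record-high indices and their differences =====
def pr (L : List Int) (i : Nat) : Bool :=
  (List.range i).all (fun k => decide (L.getD k 0 < L.getD i 0))

def recs (L : List Int) : List Nat := (List.range L.length).filter (pr L)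

def ansOf (L : List Int) : List Int :=
  ((recs L).zip ((recs L).drop 1 ++ [L.length])).map (fun p => ((p.2 : Int)) - ((p.1 : Int)))

theorem pr_iff (L : List Int) (i : Nat) :
    pr L i = true ↔ ∀ k < i, L.getD k 0 < L.getD i 0 := by
  simp [pr]

-- record-high indices of x::xs = 0, then the record-high indices of the next group's
-- suffix shifted past the first group
theorem recs_cons (x : Int) (xs : List Int) :
    recs (x :: xs) = 0 :: ((recs (xs.dropWhile (fun y => decide (y ≤ x)))).map
      (fun j => j + ((xs.takeWhile (fun y => decide (y ≤ x))).length + 1))) := by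
  set p : Int → Bool := fun y => decide (y ≤ x) with hp
  set tw := xs.takeWhile p with htw
  set rest := xs.dropWhile p with hrest
  set t := tw.length with ht
  have hsplit : tw ++ rest = xs := List.takeWhile_append_dropWhile
  have hlen : t + rest.length = xs.length := by
    rw [← hsplit]; simp [ht]
  have hxs_tw : ∀ j, j < t → xs.getD j 0 ≤ x := by
    intro j hj
    have hjx : j < xs.length := by omega
    have hjt : j < tw.length := hj
    have hEq : tw[j] = xs[j] := (List.takeWhile_prefix p).getElem hjt
    have hmem : tw[j] ∈ tw := List.getElem_mem hjt
    have hmem' : tw[j] ∈ List.takeWhile p xs := by rw [← htw]; exact hmem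
    have hple := List.mem_takeWhile_imp hmem'
    rw [hp] at hple
    rw [List.getD_eq_getElem (l := xs) (hn := hjx), ← hEq]
    exact of_decide_eq_true hple
  have hxs_rest : ∀ i, i < rest.length → xs.getD (t + i) 0 = rest.getD i 0 := by
    intro i hi
    have h1 : t + i < xs.length := by omega
    rw [List.getD_eq_getElem?_getD, List.getD_eq_getElem?_getD]
    conv_lhs => rw [← hsplit]
    rw [List.getElem?_append_right (by omega)]
    have h2 : t + i - tw.length = i := by omega
    rw [h2]
  have hhead : ∀ h0 : 0 < rest.length, x < rest.getD 0 0 := by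
    intro h0
    cases hr : rest with
    | nil => rw [hr] at h0; simp at h0
    | cons a as =>
      have hdw : List.dropWhile p xs = a :: as := by rw [← hrest]; exact hr
      have hne : List.dropWhile p xs ≠ [] := by rw [hdw]; simp
      have hph := List.head_dropWhile_not p hne
      have hh1 : (List.dropWhile p xs).head? = some a := by rw [hdw]; rfl
      have hh2 : (List.dropWhile p xs).head? = some ((List.dropWhile p xs).head hne) :=
        List.head?_eq_some_head hne
      have hha : (List.dropWhile p xs).head hne = a := by
        rw [hh1] at hh2; exact (Option.some_injective _ hh2).symm
      rw [hha, hp] at hph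
      simp only [List.getD_cons_zero]
      simp only [decide_eq_false_iff_not, not_le] at hph
      exact hph
  -- expand recs (x :: xs)
  show (List.range (xs.length + 1)).filter (pr (x :: xs)) = _
  rw [List.range_succ_eq_map, List.filter_cons_of_pos (by rw [pr_iff]; intro k hk; omega),
    List.filter_map]
  congr 1
  rw [← hlen, List.range_add, List.filter_append, List.filter_map]
  have hfst : (List.range t).filter (pr (x :: xs) ∘ Nat.succ) = [] := by
    rw [List.filter_eq_nil_iff]
    intro j hj
    rw [List.mem_range] at hj
    simp only [Function.comp]
    intro habs
    rw [pr_iff] at habs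
    have h1 := habs 0 (by omega)
    rw [List.getD_cons_zero, List.getD_cons_succ] at h1
    have h2 := hxs_tw j hj
    omega
  rw [hfst, List.nil_append]
  have hsnd : ∀ i ∈ List.range rest.length,
      ((pr (x :: xs) ∘ Nat.succ) ∘ fun k => t + k) i = pr rest i := by
    intro i hi
    rw [List.mem_range] at hi
    simp only [Function.comp]
    rw [Bool.eq_iff_iff, pr_iff, pr_iff]
    have hV : (x :: xs).getD (t + i).succ 0 = rest.getD i 0 := by
      rw [List.getD_cons_succ]; exact hxs_rest i hi
    constructor
    · intro h m hm
      have := h (t + m).succ (by omega)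
      rw [hV, List.getD_cons_succ, hxs_rest m (by omega)] at this
      exact this
    · intro h k hk
      rw [hV]
      have hx : x < rest.getD i 0 := by
        rcases Nat.eq_zero_or_pos i with hi0 | hi0
        · subst hi0; exact hhead hi
        · have := h 0 hi0
          have := hhead (by omega)
          omega
      match k with
      | 0 => rw [List.getD_cons_zero]; exact hx
      | Nat.succ j =>
        rw [List.getD_cons_succ]
        by_cases hjt : j < t
        · have := hxs_tw j hjt
          omega
        · have hji : j - t < i := by omega
          have : xs.getD j 0 = rest.getD (j - t) 0 := by
            have := hxs_rest (j - t) (by omega)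
            rwa [Nat.add_sub_cancel' (by omega)] at this
          rw [this]
          exact h (j - t) hji
  rw [List.filter_congr hsnd, List.map_map]
  show _ = List.map (fun j => j + (t + 1)) ((List.range rest.length).filter (pr rest))
  apply List.map_congr_left
  intro a _
  simp only [Function.comp]
  omega

-- shifting both index lists by a constant does not change the differences
theorem zip_diff_shift (s : Nat) (A B : List Nat) :
    ((A.map (fun j => j + s)).zip (B.map (fun j => j + s))).map
        (fun p : Nat × Nat => ((p.2 : Int)) - ((p.1 : Int)))
      = (A.zip B).map (fun p : Nat × Nat => ((p.2 : Int)) - ((p.1 : Int))) := by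
  rw [List.zip_map, List.map_map]
  apply List.map_congr_left
  intro a _
  simp only [Function.comp, Prod.map]
  push_cast
  ring

theorem ansOf_eq_group (L : List Int) : ansOf L = group L := by
  induction L using group.induct with
  | case1 => simp [ansOf, recs, group]
  | case2 x xs ih =>
    rw [group]
    set p : Int → Bool := fun y => decide (y ≤ x) with hp
    set tw := xs.takeWhile p with htw
    set rest := xs.dropWhile p with hrest
    set t := tw.length with ht
    have hsplit : tw ++ rest = xs := List.takeWhile_append_dropWhile
    have hlen : t + rest.length = xs.length := by rw [← hsplit]; simp [ht]
    have hrec : recs (x :: xs) = 0 :: ((recs rest).map (fun j => j + (t + 1))) := recs_cons x xs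
    cases hr : rest with
    | nil =>
      have ht' : t = xs.length := by rw [← hlen, hr]; simp
      have hrecr : recs rest = [] := by rw [hr]; rfl
      unfold ansOf
      rw [hrec, hrecr]
      simp [group, ht']
      omega
    | cons y ys =>
      have hrecr : recs rest = 0 :: ((recs (ys.dropWhile (fun z => decide (z ≤ y)))).map
          (fun j => j + ((ys.takeWhile (fun z => decide (z ≤ y))).length + 1))) := by
        rw [hr]; exact recs_cons y ys
      set R' := (recs (ys.dropWhile (fun z => decide (z ≤ y)))).map
          (fun j => j + ((ys.takeWhile (fun z => decide (z ≤ y))).length + 1)) with hR'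
      unfold ansOf
      rw [hrec, hrecr]
      simp only [List.map_cons, List.drop_succ_cons, List.drop_zero, List.cons_append,
        List.zip_cons_cons, List.map_cons]
      congr 1
      · push_cast; ring
      · have hn' : (x :: xs).length = rest.length + (t + 1) := by
          simp only [List.length_cons]; omega
        rw [hn']
        have htail := zip_diff_shift (t + 1) (0 :: R') (R' ++ [rest.length])
        simp only [List.map_cons, List.map_append, List.map_nil] at htail
        rw [htail]
        have hrw : ansOf rest = ((0 :: R').zip (R' ++ [rest.length])).map
            (fun p : Nat × Nat => ((p.2 : Int)) - ((p.1 : Int))) := by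
          unfold ansOf
          rw [hrecr]
          simp only [List.drop_succ_cons, List.drop_zero]
        rw [← hrw, ih, hr]

-- bridge: the B port computes ansOf of the days list
theorem alt_days_eq (progresses speeds : List Int) :
    (PySem.List.pyRange 0 progresses.length 1).map (fun i =>
      PySem.Int.floordiv (100 - PySem.List.pyGetD progresses i 0) (PySem.List.pyGetD speeds i 0)
      + (if PySem.Int.mod (100 - PySem.List.pyGetD progresses i 0) (PySem.List.pyGetD speeds i 0) > 0 then 1 else 0))
    = dayList progresses speeds progresses.length := by
  rw [PySem.List.pyRange_zero_nat, List.map_map]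
  unfold dayList
  apply List.map_congr_left
  intro k _
  simp only [Function.comp, dayAt]
  by_cases hm : PySem.Int.mod (100 - PySem.List.pyGetD progresses (k : Int) 0) (PySem.List.pyGetD speeds (k : Int) 0) > 0
  · rw [if_pos hm, if_pos hm]
  · rw [if_neg hm, if_neg hm]; ring

theorem alt_starts_eq (L : List Int) :
    (PySem.List.pyRange 0 L.length 1).filter (fun i =>
      (PySem.List.pyRange 0 i 1).all (fun k => decide (PySem.List.pyGetD L k 0 < PySem.List.pyGetD L i 0)))
    = List.map (fun k : Nat => (k : Int)) (recs L) := by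
  rw [PySem.List.pyRange_zero_nat, List.filter_map]
  unfold recs
  congr 1
  apply List.filter_congr
  intro j _
  simp only [Function.comp]
  rw [PySem.List.pyRange_zero_nat, List.all_map]
  show _ = (List.range j).all (fun k => decide (L.getD k 0 < L.getD j 0))
  congr 1
  funext k
  simp only [Function.comp, PySem.List.pyGetD_natCast]

theorem solution_alt_eq_ansOf (progresses speeds : List Int) :
    solution_alt progresses speeds = ansOf (dayList progresses speeds progresses.length) := by
  simp only [solution_alt]
  rw [alt_days_eq, alt_starts_eq]
  set L := dayList progresses speeds progresses.length with hL
  set S := recs L with hS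
  rw [← List.map_drop]
  have h1 : [(L.length : Int)] = List.map (fun k : Nat => (k : Int)) [L.length] := by simp
  rw [h1, ← List.map_append, List.zip_map, List.map_map]
  unfold ansOf
  rw [← hS]
  apply List.map_congr_left
  intro a _
  simp [Prod.map]

-- ===== VERDICT (by name: the statement is the Claim_ definition above) =====
theorem solution_spec : Claim_equal_solution := by
  intro progresses speeds _ _
  unfold Spec_solution
  rw [solution_eq_group, solution_alt_eq_ansOf, ansOf_eq_group]
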